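-- pv_equiv track=rewrite | github.com/trevormax-smith/advent_of_code | 2015/day01.py | what_floor
-- ===== SOURCE A (Python) =====
-- def what_floor(instructions):
--     '''
--     Given instructions as a sequence of open or closed parentheses, e.g. "()())()()"
--     return a the floor that you end up on. Open paren means go up one floor. Close
--     paren means go down one floor. You start on floor 0.
--     '''
--
--     current_floor = 0
--     first_visits_basement_at = 0
--
--     for instruction_number, instruction in enumerate(instructions):
--         if instruction == "(":
--             current_floor = current_floor + 1
--         elif instruction == ')':
--             current_floor = current_floor - 1
--         else:
--             raise ValueError(f"Unexpected instruction encountered {instruction}")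
--
--         if first_visits_basement_at == 0 and current_floor < 0:
--             first_visits_basement_at = instruction_number + 1
--
--     return current_floor, first_visits_basement_at
-- ===== SOURCE B (Python) =====
-- def what_floor(instructions):
--     # Pass 1: validate, raising the same ValueError on the first bad char.
--     for instruction in instructions:
--         if instruction != "(" and instruction != ")":
--             raise ValueError(f"Unexpected instruction encountered {instruction}")
--     # Final floor is a closed form over character counts.
--     final = instructions.count("(") - instructions.count(")")
--     # First basement visit: scan the running depth, stop at the first negative.
--     first = 0
--     depth = 0
--     for i, c in enumerate(instructions):
--         depth += 1 if c == "(" else -1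
--         if depth < 0:
--             first = i + 1
--             break
--     return final, first
-- ===== Notes on version B (the rewrite author's own statement) =====
-- stated objective: simpler
-- what changed: Replaces the single fused loop carrying two pieces of state with separate passes: the final floor is the closed form count('(')-count(')'), and the first basement step is a scan that breaks at the first negative running depth.
import Mathlib
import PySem

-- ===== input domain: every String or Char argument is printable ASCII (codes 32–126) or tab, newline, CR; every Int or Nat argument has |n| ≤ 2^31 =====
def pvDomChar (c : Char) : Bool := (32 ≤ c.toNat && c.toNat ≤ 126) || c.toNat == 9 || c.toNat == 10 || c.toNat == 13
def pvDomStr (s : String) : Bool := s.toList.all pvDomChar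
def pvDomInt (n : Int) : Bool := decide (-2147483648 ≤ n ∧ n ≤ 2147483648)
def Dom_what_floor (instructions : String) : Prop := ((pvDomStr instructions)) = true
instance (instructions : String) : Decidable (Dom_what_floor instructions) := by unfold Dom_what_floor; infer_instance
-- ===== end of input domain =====

-- B replaces A's single fused loop by a closed-form count for the final floor and a
-- separate break-at-first-negative scan for the basement step (objective: simpler).

-- ===== PORT A =====
-- A's single loop over enumerate(instructions) carrying (current_floor, first_visits_basement_at);
-- the 'else: raise ValueError' branch returns (0, 0) here — those inputs are excluded by Pre_.
def whatFloorGoA : List Char → Int → Int → Int → Int × Int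
  | [], f, b, _ => (f, b)
  | c :: cs, f, b, i =>
    if c = '(' then
      whatFloorGoA cs (f + 1) (if b = 0 ∧ f + 1 < 0 then i + 1 else b) (i + 1)
    else if c = ')' then
      whatFloorGoA cs (f - 1) (if b = 0 ∧ f - 1 < 0 then i + 1 else b) (i + 1)
    else (0, 0)  -- raise ValueError (unreachable under Pre_)

def what_floor (instructions : String) : Int × Int :=
  whatFloorGoA instructions.toList 0 0 0

-- ===== PORT B =====
-- pass 1: the validation loop ('raise' → false, excluded by Pre_)
def whatFloorValidB : List Char → Bool
  | [] => true
  | c :: cs => if c ≠ '(' ∧ c ≠ ')' then false else whatFloorValidB cs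

-- pass 3: scan the running depth, break at the first negative
def whatFloorFirstB : List Char → Int → Int → Int
  | [], _, _ => 0
  | c :: cs, d, i =>
    let d' := d + (if c = '(' then 1 else -1)
    if d' < 0 then i + 1 else whatFloorFirstB cs d' (i + 1)

def what_floor_alt (instructions : String) : Int × Int :=
  if whatFloorValidB instructions.toList then
    ((instructions.toList.count '(' : Int) - (instructions.toList.count ')' : Int),
      whatFloorFirstB instructions.toList 0 0)
  else (0, 0)  -- raise ValueError (unreachable under Pre_)

-- ===== PRECONDITION & SPEC =====
-- Pre_ excludes exactly the inputs containing a character other than '(' or ')',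
-- on which Python A raises ValueError.
def Pre_what_floor (instructions : String) : Prop :=
  instructions.toList.all (fun c => c == '(' || c == ')') = true
instance (instructions : String) : Decidable (Pre_what_floor instructions) := by
  unfold Pre_what_floor; infer_instance

def pvWitness_what_floor : String := "()())(("

def Spec_what_floor (instructions : String) (out : Int × Int) : Prop := out = what_floor_alt instructions
instance (instructions : String) (out : Int × Int) : Decidable (Spec_what_floor instructions out) := by unfold Spec_what_floor; infer_instance

-- ===== CLAIM (what is proved, stated in full; the proofs are below) =====
def Claim_equal_what_floor : Prop := ∀ (instructions : String), Dom_what_floor instructions → Pre_what_floor instructions → Spec_what_floor instructions (what_floor instructions)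

-- ===== LEMMAS AND PROOFS =====

def pvCnt (cs : List Char) : Int := (cs.count '(' : Int) - (cs.count ')' : Int)

theorem pvCnt_cons (c : Char) (cs : List Char) (h : c = '(' ∨ c = ')') :
    pvCnt (c :: cs) = (if c = '(' then 1 else -1) + pvCnt cs := by
  rcases h with h | h <;> subst h <;> simp [pvCnt] <;> omega

theorem validB_of_valid (cs : List Char) (h : ∀ c ∈ cs, c = '(' ∨ c = ')') :
    whatFloorValidB cs = true := by
  induction cs with
  | nil => rfl
  | cons c cs ih =>
    have hc := h c (List.mem_cons_self)
    have : whatFloorValidB (c :: cs) = whatFloorValidB cs := by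
      rcases hc with h' | h' <;> subst h' <;> simp [whatFloorValidB]
    rw [this]; exact ih (fun x hx => h x (List.mem_cons_of_mem _ hx))

theorem goA_cons_open (cs : List Char) (f b i : Int) :
    whatFloorGoA ('(' :: cs) f b i
      = whatFloorGoA cs (f + 1) (if b = 0 ∧ f + 1 < 0 then i + 1 else b) (i + 1) := by
  simp [whatFloorGoA]

theorem goA_cons_close (cs : List Char) (f b i : Int) :
    whatFloorGoA (')' :: cs) f b i
      = whatFloorGoA cs (f - 1) (if b = 0 ∧ f - 1 < 0 then i + 1 else b) (i + 1) := by
  simp [whatFloorGoA]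

theorem firstB_cons_open (cs : List Char) (d i : Int) :
    whatFloorFirstB ('(' :: cs) d i
      = if d + 1 < 0 then i + 1 else whatFloorFirstB cs (d + 1) (i + 1) := by
  simp [whatFloorFirstB]

theorem firstB_cons_close (cs : List Char) (d i : Int) :
    whatFloorFirstB (')' :: cs) d i
      = if d - 1 < 0 then i + 1 else whatFloorFirstB cs (d - 1) (i + 1) := by
  have : d + -1 = d - 1 := by ring
  simp [whatFloorFirstB, this]

theorem goA_nonzero (cs : List Char) (f b i : Int)
    (h : ∀ c ∈ cs, c = '(' ∨ c = ')') (hb : b ≠ 0) :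
    whatFloorGoA cs f b i = (f + pvCnt cs, b) := by
  induction cs generalizing f i with
  | nil => simp [whatFloorGoA, pvCnt]
  | cons c cs ih =>
    have htail := fun x hx => h x (List.mem_cons_of_mem _ hx)
    rw [pvCnt_cons c cs (h c List.mem_cons_self)]
    rcases h c List.mem_cons_self with h' | h' <;> subst h'
    · rw [goA_cons_open, if_neg (by simp [hb]), ih _ _ htail, Prod.mk.injEq,
        if_pos (rfl : ('(' : Char) = '(')]
      exact ⟨by ring, rfl⟩
    · rw [goA_cons_close, if_neg (by simp [hb]), ih _ _ htail, Prod.mk.injEq,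
        if_neg (by decide : ¬ (')' : Char) = '(')]
      exact ⟨by ring, rfl⟩

theorem goA_zero (cs : List Char) (f i : Int)
    (h : ∀ c ∈ cs, c = '(' ∨ c = ')') (hi : 0 ≤ i) :
    whatFloorGoA cs f 0 i = (f + pvCnt cs, whatFloorFirstB cs f i) := by
  induction cs generalizing f i with
  | nil => simp [whatFloorGoA, whatFloorFirstB, pvCnt]
  | cons c cs ih =>
    have htail := fun x hx => h x (List.mem_cons_of_mem _ hx)
    rw [pvCnt_cons c cs (h c List.mem_cons_self)]
    rcases h c List.mem_cons_self with h' | h' <;> subst h'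
    · rw [goA_cons_open, firstB_cons_open]
      by_cases hneg : f + 1 < 0
      · rw [if_pos ⟨rfl, hneg⟩, if_pos hneg,
          goA_nonzero cs (f + 1) (i + 1) (i + 1) htail (by omega), Prod.mk.injEq,
          if_pos (rfl : ('(' : Char) = '(')]
        exact ⟨by ring, rfl⟩
      · rw [if_neg (by simp [hneg]), if_neg hneg, ih (f + 1) (i + 1) htail (by omega),
          Prod.mk.injEq, if_pos (rfl : ('(' : Char) = '(')]
        exact ⟨by ring, rfl⟩
    · rw [goA_cons_close, firstB_cons_close]
      by_cases hneg : f - 1 < 0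
      · rw [if_pos ⟨rfl, hneg⟩, if_pos hneg,
          goA_nonzero cs (f - 1) (i + 1) (i + 1) htail (by omega), Prod.mk.injEq,
          if_neg (by decide : ¬ (')' : Char) = '(')]
        exact ⟨by ring, rfl⟩
      · rw [if_neg (by simp [hneg]), if_neg hneg, ih (f - 1) (i + 1) htail (by omega),
          Prod.mk.injEq, if_neg (by decide : ¬ (')' : Char) = '(')]
        exact ⟨by ring, rfl⟩

-- ===== VERDICT (by name: the statement is the Claim_ definition above) =====
theorem what_floor_spec : Claim_equal_what_floor := by
  intro s _ hpre
  unfold Spec_what_floor what_floor what_floor_alt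
  have hv : ∀ c ∈ s.toList, c = '(' ∨ c = ')' := by
    intro c hc
    have := List.all_eq_true.mp hpre c hc
    simpa using this
  rw [validB_of_valid _ hv, if_pos rfl, goA_zero _ 0 0 hv (le_refl 0)]
  simp [pvCnt]
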